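-- pv_equiv track=rewrite | github.com/ellipse-science/vitrine_pipeline | code/python/3bis_metrics_all.py | compute_labelwise_confusion
-- ===== SOURCE A (Python) =====
-- from collections import defaultdict
--
-- def compute_labelwise_confusion(gold_list, pred_list, label_set):
--  """
--  Calcule les matrices de confusion par étiquette.
--
--  Paramètres :
--  -----------
--  gold_list : list
--      gold_list[i] = ensemble des étiquettes de référence pour l'élément i
--  pred_list : list
--      pred_list[i] = ensemble des étiquettes prédites pour l'élément i
--  label_set : set
--      Union des étiquettes de référence et prédites (pour le comptage de confusion)
--
--  Renvoie :
--  --------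
--  tuple
--      tp[étiquette], fp[étiquette], fn[étiquette] pour chaque étiquette dans label_set.
--      (Nous ne calculons PAS explicitement TN car nous en avons uniquement besoin pour les micro/macro.)
--  """
--  tp = defaultdict(int)
--  fp = defaultdict(int)
--  fn = defaultdict(int)
--
--  for i in range(len(gold_list)):
--      g = gold_list[i]
--      p = pred_list[i]
--      for lbl in label_set:
--          in_gold = (lbl in g)
--          in_pred = (lbl in p)
--          if in_gold and in_pred:
--              tp[lbl] += 1
--          elif in_gold and not in_pred:
--              fn[lbl] += 1
--          elif not in_gold and in_pred:
--              fp[lbl] += 1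
--          else:
--              # TN - not needed for multi-label micro/macro
--              pass
--
--  return tp, fp, fn
-- ===== SOURCE B (Python) =====
-- from collections import Counter
--
-- def compute_labelwise_confusion(gold_list, pred_list, label_set):
--     labels = set(label_set)
--     tp, fp, fn = Counter(), Counter(), Counter()
--     for g, p in zip(gold_list, pred_list):
--         gs = labels & set(g)
--         ps = labels & set(p)
--         tp.update(gs & ps)
--         fn.update(gs - ps)
--         fp.update(ps - gs)
--     return tp, fp, fn
-- ===== Notes on version B (the rewrite author's own statement) =====
-- stated objective: faster
-- what changed: Instead of testing every label of label_set against every item, B converts each item's gold/pred lists to sets once and counts TP/FN/FP with set algebra (gs&ps, gs-ps, ps-gs) into Counters, skipping all true negatives; Pre_ excludes inputs where A raises IndexError (pred_list shorter than gold_list) and, on the Lean list encoding of the set label_set, lists with duplicates, which do not represent a Python set.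
import Mathlib
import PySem

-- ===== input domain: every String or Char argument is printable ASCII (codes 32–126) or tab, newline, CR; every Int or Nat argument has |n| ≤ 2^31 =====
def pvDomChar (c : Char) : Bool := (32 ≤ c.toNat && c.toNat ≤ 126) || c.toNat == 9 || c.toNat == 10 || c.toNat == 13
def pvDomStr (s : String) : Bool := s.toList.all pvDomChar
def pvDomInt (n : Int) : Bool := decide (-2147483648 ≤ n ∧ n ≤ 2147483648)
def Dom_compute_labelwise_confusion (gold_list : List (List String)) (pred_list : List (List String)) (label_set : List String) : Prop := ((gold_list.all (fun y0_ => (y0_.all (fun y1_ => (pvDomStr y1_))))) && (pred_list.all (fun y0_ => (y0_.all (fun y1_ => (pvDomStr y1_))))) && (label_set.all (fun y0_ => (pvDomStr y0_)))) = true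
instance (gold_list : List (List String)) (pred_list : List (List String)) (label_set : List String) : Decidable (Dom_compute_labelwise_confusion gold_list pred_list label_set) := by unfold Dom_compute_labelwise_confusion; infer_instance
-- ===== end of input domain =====

-- B replaces A's per-item scan of the whole label_set by per-item set algebra
-- (gs&ps / gs-ps / ps-gs counted into Counters), skipping true negatives (objective: faster).

-- ===== PORT A =====
-- body of A's inner 'for lbl in label_set' loop (state = (tp, fp, fn); 'd[lbl] += 1' on a
-- defaultdict(int) is d.insert lbl (d.getD lbl 0 + 1): first access inserts the key)
def pvAStep (g p : List String)
    (st : PySem.Dict String Int × PySem.Dict String Int × PySem.Dict String Int) (lbl : String) :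
    PySem.Dict String Int × PySem.Dict String Int × PySem.Dict String Int :=
  let in_gold := g.contains lbl
  let in_pred := p.contains lbl
  if in_gold && in_pred then (st.1.insert lbl (st.1.getD lbl 0 + 1), st.2.1, st.2.2)
  else if in_gold && !in_pred then (st.1, st.2.1, st.2.2.insert lbl (st.2.2.getD lbl 0 + 1))
  else if !in_gold && in_pred then (st.1, st.2.1.insert lbl (st.2.1.getD lbl 0 + 1), st.2.2)
  else st

def compute_labelwise_confusion (gold_list : List (List String)) (pred_list : List (List String)) (label_set : List String) : (List (String × Int)) × (List (String × Int)) × (List (String × Int)) :=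
  -- for i in range(len(gold_list)): g = gold_list[i]; p = pred_list[i]; inner loop
  -- (pyGet? = none is Python's IndexError: outside Pre_, the fold skips there)
  let st := (PySem.List.pyRange 0 (PySem.List.len gold_list) 1).foldl
    (fun st i =>
      match PySem.List.pyGet? gold_list i, PySem.List.pyGet? pred_list i with
      | some g, some p => label_set.foldl (pvAStep g p) st
      | _, _ => st)
    (PySem.Dict.empty, PySem.Dict.empty, PySem.Dict.empty)
  (st.1.items, st.2.1.items, st.2.2.items)

-- ===== PORT B =====
-- c.update(s): for each element of s, c[x] += 1 (Counter update; s is a Set, whose Python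
-- iteration order is unspecified — the resulting dicts are order-insensitive as counters)
def pvUpdate (c : PySem.Dict String Int) (s : List String) : PySem.Dict String Int :=
  s.foldl (fun c l => c.insert l (c.getD l 0 + 1)) c

def compute_labelwise_confusion_alt (gold_list : List (List String)) (pred_list : List (List String)) (label_set : List String) : (List (String × Int)) × (List (String × Int)) × (List (String × Int)) :=
  let labels := PySem.Set.ofList label_set
  let st := (gold_list.zip pred_list).foldl
    (fun st gp =>
      let gs := PySem.Set.inter labels (PySem.Set.ofList gp.1)
      let ps := PySem.Set.inter labels (PySem.Set.ofList gp.2)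
      (pvUpdate st.1 (PySem.Set.inter gs ps),
       pvUpdate st.2.1 (PySem.Set.diff ps gs),
       pvUpdate st.2.2 (PySem.Set.diff gs ps)))
    (PySem.Dict.empty, PySem.Dict.empty, PySem.Dict.empty)
  (st.1.items, st.2.1.items, st.2.2.items)

-- ===== PRECONDITION & SPEC =====
-- Pre_ excludes (a) pred_list shorter than gold_list, where A raises IndexError, and
-- (b) label_set with duplicate elements, which is not a value of its documented Python
-- type set[str] (A double-counts each duplicate there, B counts it once).
def Pre_compute_labelwise_confusion (gold_list : List (List String)) (pred_list : List (List String)) (label_set : List String) : Prop :=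
  gold_list.length ≤ pred_list.length ∧ label_set.Nodup
instance (gold_list : List (List String)) (pred_list : List (List String)) (label_set : List String) : Decidable (Pre_compute_labelwise_confusion gold_list pred_list label_set) := by unfold Pre_compute_labelwise_confusion; infer_instance

def pvWitness_compute_labelwise_confusion : List (List String) × List (List String) × List String :=
  ([["a"], ["b", "c"]], [["a", "b"], ["c"]], ["a", "b", "c"])

def Spec_compute_labelwise_confusion (gold_list : List (List String)) (pred_list : List (List String)) (label_set : List String) (out : (List (String × Int)) × (List (String × Int)) × (List (String × Int))) : Prop := out = compute_labelwise_confusion_alt gold_list pred_list label_set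
instance (gold_list : List (List String)) (pred_list : List (List String)) (label_set : List String) (out : (List (String × Int)) × (List (String × Int)) × (List (String × Int))) : Decidable (Spec_compute_labelwise_confusion gold_list pred_list label_set out) := by unfold Spec_compute_labelwise_confusion; infer_instance

-- ===== CLAIM =====
def Claim_equal_compute_labelwise_confusion : Prop := ∀ (gold_list : List (List String)) (pred_list : List (List String)) (label_set : List String), Dom_compute_labelwise_confusion gold_list pred_list label_set → Pre_compute_labelwise_confusion gold_list pred_list label_set → Spec_compute_labelwise_confusion gold_list pred_list label_set (compute_labelwise_confusion gold_list pred_list label_set)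

-- ===== LEMMAS AND PROOFS =====

-- A's single scan of label_set splits into B's three per-category filtered passes
theorem pvA_split (L g p : List String) :
    ∀ (t f n : PySem.Dict String Int),
      L.foldl (pvAStep g p) (t, f, n)
        = (pvUpdate t (L.filter (fun l => g.contains l && p.contains l)),
           pvUpdate f (L.filter (fun l => !g.contains l && p.contains l)),
           pvUpdate n (L.filter (fun l => g.contains l && !p.contains l))) := by
  induction L with
  | nil => intro t f n; rfl
  | cons x T ih =>
    intro t f n
    by_cases hg : x ∈ g <;> by_cases hp : x ∈ p <;>
      simp [pvAStep, pvUpdate, hg, hp, List.foldl_cons, ih]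

-- B's three per-item set-algebra lists are exactly those three filtered passes
theorem pvB_lists (L g p : List String) (hnd : L.Nodup) :
    PySem.Set.inter (PySem.Set.inter (PySem.Set.ofList L) (PySem.Set.ofList g))
        (PySem.Set.inter (PySem.Set.ofList L) (PySem.Set.ofList p))
      = L.filter (fun l => g.contains l && p.contains l)
    ∧ PySem.Set.diff (PySem.Set.inter (PySem.Set.ofList L) (PySem.Set.ofList p))
        (PySem.Set.inter (PySem.Set.ofList L) (PySem.Set.ofList g))
      = L.filter (fun l => !g.contains l && p.contains l)
    ∧ PySem.Set.diff (PySem.Set.inter (PySem.Set.ofList L) (PySem.Set.ofList g))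
        (PySem.Set.inter (PySem.Set.ofList L) (PySem.Set.ofList p))
      = L.filter (fun l => g.contains l && !p.contains l) := by
  rw [PySem.Set.ofList_eq_self_of_nodup L hnd]
  unfold PySem.Set.inter PySem.Set.diff
  simp only [List.filter_filter]
  refine ⟨?_, ?_, ?_⟩ <;>
  · apply List.filter_congr
    intro x hx
    simp [PySem.Set.mem_ofList, hx, List.mem_filter, Bool.and_comm]

-- A's per-item inner loop equals B's per-item step
theorem pv_item_eq (L g p : List String) (hnd : L.Nodup)
    (st : PySem.Dict String Int × PySem.Dict String Int × PySem.Dict String Int) :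
    L.foldl (pvAStep g p) st
      = (pvUpdate st.1 (PySem.Set.inter
            (PySem.Set.inter (PySem.Set.ofList L) (PySem.Set.ofList g))
            (PySem.Set.inter (PySem.Set.ofList L) (PySem.Set.ofList p))),
         pvUpdate st.2.1 (PySem.Set.diff
            (PySem.Set.inter (PySem.Set.ofList L) (PySem.Set.ofList p))
            (PySem.Set.inter (PySem.Set.ofList L) (PySem.Set.ofList g))),
         pvUpdate st.2.2 (PySem.Set.diff
            (PySem.Set.inter (PySem.Set.ofList L) (PySem.Set.ofList g))
            (PySem.Set.inter (PySem.Set.ofList L) (PySem.Set.ofList p)))) := by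
  obtain ⟨h1, h2, h3⟩ := pvB_lists L g p hnd
  rw [h1, h2, h3]
  exact pvA_split L g p st.1 st.2.1 st.2.2

-- A's index loop over range(len(gold_list)) is a fold over zip when pred_list is long enough
theorem pv_outer_zip {σ : Type} (f : σ → List String → List String → σ)
    (gold pred : List (List String)) (hlen : gold.length ≤ pred.length) (st : σ) :
    (PySem.List.pyRange 0 (gold.length : Int) 1).foldl
      (fun st i =>
        match PySem.List.pyGet? gold i, PySem.List.pyGet? pred i with
        | some g, some p => f st g p
        | _, _ => st) st
    = (gold.zip pred).foldl (fun st gp => f st gp.1 gp.2) st := by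
  have key : ∀ n : Nat, n ≤ gold.length →
      (PySem.List.pyRange 0 (n : Int) 1).foldl
        (fun st i =>
          match PySem.List.pyGet? gold i, PySem.List.pyGet? pred i with
          | some g, some p => f st g p
          | _, _ => st) st
      = ((gold.zip pred).take n).foldl (fun st gp => f st gp.1 gp.2) st := by
    intro n
    induction n with
    | zero =>
      intro _
      rw [show ((0 : Nat) : Int) = (0 : Int) from rfl, PySem.List.pyRange_one_eq_nil le_rfl]
      rfl
    | succ m ih =>
      intro hm
      have hmg : m < gold.length := by omega
      have hmp : m < pred.length := by omega
      have hmz : m < (gold.zip pred).length := by rw [List.length_zip]; omega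
      rw [show ((m + 1 : Nat) : Int) = (m : Int) + 1 by push_cast; ring,
        PySem.List.pyRange_one_succ_right (by exact_mod_cast Nat.zero_le m),
        List.foldl_append, ih (by omega), List.take_add_one]
      simp only [List.foldl, List.getElem?_eq_getElem hmz, Option.toList_some,
        List.foldl_append, PySem.List.pyGet?_natCast, List.getElem?_eq_getElem hmg,
        List.getElem?_eq_getElem hmp, List.getElem_zip]
  have := key gold.length le_rfl
  rwa [List.take_of_length_le (by rw [List.length_zip]; omega)] at this

-- ===== VERDICT =====
theorem compute_labelwise_confusion_spec : Claim_equal_compute_labelwise_confusion := by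
  intro gold pred labels _ hpre
  obtain ⟨hlen, hnd⟩ := hpre
  unfold Spec_compute_labelwise_confusion compute_labelwise_confusion compute_labelwise_confusion_alt
  rw [PySem.List.len_eq,
    pv_outer_zip (fun st g p => labels.foldl (pvAStep g p) st) gold pred hlen]
  rw [PySem.List.foldl_congr_mem _ _ _ _
    (fun acc gp _ => pv_item_eq labels gp.1 gp.2 hnd acc)]
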